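-- pv_equiv track=rewrite | github.com/Sett03/Exc-Ui-Graphique | ondulant/ondulant.py | ondt
-- ===== SOURCE A (Python) =====
-- def ondt(a):
--     c=a+"non ondulant"
--     L=len(a)
--     i=0
--     if int(a)<100:
--         c="introduire un numero >=100"
--     else:
--         valid = False
--         while valid == False:
--             if a[i]==a[i+2]:
--                 i=i+1
--             if i== L-2:
--                 c=a+"ondulant"
--             if c==a+"ondulant" or a[i]!=a[i+2]:
--                 valid=True
--     return c
-- ===== SOURCE B (Python) =====
-- def ondt(a):
--     if int(a) < 100:
--         return "introduire un numero >=100"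
--     # ondulant  <=>  every char equals the char two places later  <=>  a shifted by 2 equals a truncated by 2
--     return a + ("ondulant" if a[2:] == a[:-2] else "non ondulant")
-- ===== Notes on version B (the rewrite author's own statement) =====
-- stated objective: simpler
-- what changed: A's stateful while-loop (index i, flag valid, sentinel string c, re-reading a[i] and a[i+2] twice per iteration) is replaced by a single shifted-string comparison: the number is ondulant iff a[2:] == a[:-2]; the int(a) < 100 guard and the exact result strings are kept, and B raises ValueError exactly where A does.
import Mathlib
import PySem

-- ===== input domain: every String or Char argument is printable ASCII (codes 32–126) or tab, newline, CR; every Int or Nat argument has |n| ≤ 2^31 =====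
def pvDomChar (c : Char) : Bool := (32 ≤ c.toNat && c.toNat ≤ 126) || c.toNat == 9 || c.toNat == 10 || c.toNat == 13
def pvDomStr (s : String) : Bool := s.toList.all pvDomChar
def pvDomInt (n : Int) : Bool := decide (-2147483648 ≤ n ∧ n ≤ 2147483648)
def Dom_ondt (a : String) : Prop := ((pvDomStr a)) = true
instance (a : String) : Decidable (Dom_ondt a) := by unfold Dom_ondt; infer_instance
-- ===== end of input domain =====

-- B replaces A's stateful while-loop scan with a single comparison of the string against
-- itself shifted by two (a[2:] == a[:-2]); objective: simpler (no speed claim).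

-- ===== PORT A =====
-- A's while loop: state is i (starts at 0, only ever incremented by 1) and c (always
-- a ++ "non ondulant" on loop entry, since the loop exits as soon as c changes).
-- Each iteration transliterated in Python's order: (1) if a[i]==a[i+2] then i += 1,
-- (2) if i==L-2 then c becomes a+"ondulant", (3) exit test re-reads a[i] and a[i+2]
-- at the NEW i (short-circuited away when c is already ondulant).
-- "IndexError" marks where Python would raise (unreachable under Pre_ondt).
def ondtLoop (a : String) (s : List Char) (L : Int) (i : Nat) : String :=
  match PySem.List.pyGet? s (i : Int), h2 : PySem.List.pyGet? s ((i : Int) + 2) with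
  | some x, some y =>
    if x = y then
      if ((i : Int) + 1) = L - 2 then a ++ "ondulant"
      else
        match PySem.List.pyGet? s ((i : Int) + 1), PySem.List.pyGet? s ((i : Int) + 3) with
        | some x', some y' =>
          if x' = y' then ondtLoop a s L (i + 1) else a ++ "non ondulant"
        | _, _ => "IndexError"
    else
      if (i : Int) = L - 2 then a ++ "ondulant" else a ++ "non ondulant"
  | _, _ => "IndexError"
termination_by s.length - i
decreasing_by
  have hin : PySem.Raise.InRange s.length ((i : Int) + 2) := by
    by_contra hc
    rw [← PySem.List.pyGet?_eq_none_iff (xs := s)] at hc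
    simp [hc] at h2
  unfold PySem.Raise.InRange at hin
  omega

def ondt (a : String) : String :=
  match PySem.Int.ofStr? a with
  | none => "ValueError"   -- int(a) raises ValueError; excluded by Pre_ondt
  | some n =>
    if n < 100 then "introduire un numero >=100"
    else ondtLoop a a.toList (a.toList.length : Int) 0

-- ===== PORT B =====
def ondt_alt (a : String) : String :=
  match PySem.Int.ofStr? a with
  | none => "ValueError"   -- int(a) raises ValueError; excluded by Pre_ondt
  | some n =>
    if n < 100 then "introduire un numero >=100"
    else
      a ++ (if PySem.List.slice a.toList (some 2) none
               = PySem.List.slice a.toList none (some (-2))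
            then "ondulant" else "non ondulant")

-- ===== PRECONDITION & SPEC =====
-- Pre_ondt: exactly the inputs on which Python's int(a) succeeds (A raises ValueError on
-- the rest). The '3 ≤ length' disjunct-guard is implied anyway (an integer ≥ 100 is
-- written with at least three digit characters, so such strings have length ≥ 3) and is
-- stated only to keep the precondition closed-form; it excludes no input on which A returns.
def Pre_ondt (a : String) : Prop :=
  ((PySem.Int.ofStr? a).any
    (fun n => decide (n < 100) || decide (3 ≤ a.toList.length))) = true
instance (a : String) : Decidable (Pre_ondt a) := by unfold Pre_ondt; infer_instance
def pvWitness_ondt : String := "12121"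

def Spec_ondt (a : String) (out : String) : Prop := out = ondt_alt a
instance (a : String) (out : String) : Decidable (Spec_ondt a out) := by unfold Spec_ondt; infer_instance

-- ===== CLAIM (what is proved, stated in full; the proofs are below) =====
def Claim_equal_ondt : Prop := ∀ (a : String), Dom_ondt a → Pre_ondt a → Spec_ondt a (ondt a)

-- ===== LEMMAS AND PROOFS =====

theorem pyGet?_nat (s : List Char) (n : Nat) (h : n < s.length) :
    PySem.List.pyGet? s (n : Int) = some s[n] := PySem.List.pyGet?_ofNat s n h

theorem pyGet?_nat_add (s : List Char) (n k : Nat) (h : n + k < s.length) :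
    PySem.List.pyGet? s ((n : Int) + (k : Int)) = some s[n + k] := by
  have := PySem.List.pyGet?_ofNat s (n + k) h
  rw [← this]; norm_cast

theorem getElem?_pair (s : List Char) (j : Nat) (h : j + 2 < s.length) :
    s[j]? = s[j + 2]? ↔ s[j] = s[j + 2] := by
  rw [List.getElem?_eq_getElem (by omega), List.getElem?_eq_getElem (by omega)]
  exact Option.some_inj

theorem ondtLoop_ond (a : String) (s : List Char) (i : Nat) (h : i + 2 < s.length)
    (hall : ∀ j : Nat, i ≤ j → j + 2 < s.length → s[j]? = s[j + 2]?) :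
    ondtLoop a s (s.length : Int) i = a ++ "ondulant" := by
  generalize hk : s.length - i = k
  induction k generalizing i with
  | zero => omega
  | succ k ih =>
    rw [ondtLoop]
    rw [pyGet?_nat s i (by omega), (by exact_mod_cast pyGet?_nat_add s i 2 (by omega) : PySem.List.pyGet? s ((i:Int)+2) = some s[i+2])]
    simp only []
    have hxy : s[i] = s[i + 2] := (getElem?_pair s i h).1 (hall i le_rfl h)
    rw [if_pos hxy]
    by_cases hend : ((i : Int) + 1) = (s.length : Int) - 2
    · rw [if_pos hend]
    · rw [if_neg hend]
      have hlt : i + 3 < s.length := by omega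
      rw [(by exact_mod_cast pyGet?_nat_add s i 1 (by omega) : PySem.List.pyGet? s ((i:Int)+1) = some s[i+1]), (by exact_mod_cast pyGet?_nat_add s i 3 (by omega) : PySem.List.pyGet? s ((i:Int)+3) = some s[i+3])]
      simp only []
      have hxy' : s[i + 1] = s[i + 3] :=
        (getElem?_pair s (i + 1) (by omega)).1 (hall (i + 1) (by omega) (by omega))
      rw [if_pos hxy']
      exact ih (i + 1) (by omega) (fun j hj hj2 => hall j (by omega) hj2) (by omega)

theorem ondtLoop_non (a : String) (s : List Char) (i : Nat) (h : i + 2 < s.length)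
    (m : Nat) (hm : i ≤ m) (hm2 : m + 2 < s.length) (hne : s[m] ≠ s[m + 2])
    (hbefore : ∀ j : Nat, i ≤ j → j < m → s[j]? = s[j + 2]?) :
    ondtLoop a s (s.length : Int) i = a ++ "non ondulant" := by
  generalize hk : s.length - i = k
  induction k generalizing i with
  | zero => omega
  | succ k ih =>
    rw [ondtLoop]
    rw [pyGet?_nat s i (by omega), (by exact_mod_cast pyGet?_nat_add s i 2 (by omega) : PySem.List.pyGet? s ((i:Int)+2) = some s[i+2])]
    simp only []
    by_cases hxy : s[i] = s[i + 2]
    · -- i < m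
      have him : i < m := by
        rcases Nat.lt_or_ge i m with h' | h'
        · exact h'
        · exfalso; have heq : i = m := by omega
          subst heq; exact hne hxy
      rw [if_pos hxy]
      have hend : ¬ ((i : Int) + 1) = (s.length : Int) - 2 := by
        intro hc
        -- i + 3 = s.length, but m ≥ i+1 and m+2 < s.length gives m ≥ i+1, m+2 ≤ i+2 contra
        omega
      rw [if_neg hend]
      have hlt : i + 3 < s.length := by omega
      rw [(by exact_mod_cast pyGet?_nat_add s i 1 (by omega) : PySem.List.pyGet? s ((i:Int)+1) = some s[i+1]), (by exact_mod_cast pyGet?_nat_add s i 3 (by omega) : PySem.List.pyGet? s ((i:Int)+3) = some s[i+3])]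
      simp only []
      by_cases hxy' : s[i + 1] = s[i + 3]
      · rw [if_pos hxy']
        have him' : i + 1 ≤ m := by
          rcases Nat.lt_or_ge (i+1) m with h' | h'
          · omega
          · have : i + 1 = m := by omega
            omega
        exact ih (i + 1) (by omega) him' hne (fun j hj hjm => hbefore j (by omega) hjm) (by omega)
      · rw [if_neg hxy']
    · rw [if_neg hxy]
      have hend : ¬ (i : Int) = (s.length : Int) - 2 := by omega
      rw [if_neg hend]

theorem shift_eq_iff (s : List Char) :
    (s.drop 2 = s.take (s.length - 2)) ↔ (∀ j : Nat, j + 2 < s.length → s[j]? = s[j + 2]?) := by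
  constructor
  · intro hd j hj
    have := congrArg (fun l => l[j]?) hd
    simp only [List.getElem?_drop, List.getElem?_take] at this
    rw [if_pos (by omega)] at this
    rw [← this]; congr 1; omega
  · intro hall
    apply List.ext_getElem?
    intro j
    simp only [List.getElem?_drop, List.getElem?_take]
    by_cases hj : j < s.length - 2
    · rw [if_pos hj]
      have h2 : (2 : Nat) + j = j + 2 := by omega
      rw [h2, ← hall j (by omega)]
    · rw [if_neg hj]
      apply List.getElem?_eq_none
      omega

-- ===== VERDICT (by name: the statement is the Claim_ definition above) =====
theorem ondt_spec : Claim_equal_ondt := by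
  intro a _ hpre
  unfold Spec_ondt ondt ondt_alt
  unfold Pre_ondt at hpre
  rcases hs : PySem.Int.ofStr? a with _ | n
  · exfalso; rw [hs] at hpre; simp [Option.any] at hpre
  · rw [hs] at hpre
    simp only [Option.any, Bool.or_eq_true, decide_eq_true_eq] at hpre
    simp only []
    by_cases hn : n < 100
    · simp [hn]
    · have hlen : 3 ≤ a.toList.length := by tauto
      rw [if_neg hn, if_neg hn]
      have hsl1 : PySem.List.slice a.toList (some 2) none = a.toList.drop 2 := by
        rw [PySem.List.slice_from _ (by omega)]
        congr 1
      have hsl2 : PySem.List.slice a.toList none (some (-2))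
          = a.toList.take (a.toList.length - 2) :=
        PySem.List.slice_to_neg_ofNat a.toList 2 (by omega)
      rw [hsl1, hsl2]
      by_cases hc : a.toList.drop 2 = a.toList.take (a.toList.length - 2)
      · rw [if_pos hc]
        exact ondtLoop_ond a a.toList 0 (by omega)
          (fun j _ hj2 => (shift_eq_iff a.toList).1 hc j hj2)
      · rw [if_neg hc]
        have hex : ∃ m : Nat, m + 2 < a.toList.length ∧ ¬ a.toList[m]? = a.toList[m + 2]? := by
          by_contra hno
          push_neg at hno
          exact hc ((shift_eq_iff a.toList).2 hno)
        classical
        have hm := Nat.find_spec hex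
        refine ondtLoop_non a a.toList 0 (by omega) (Nat.find hex) (by omega) hm.1 ?_ ?_
        · exact fun hcontra => hm.2 (((getElem?_pair a.toList (Nat.find hex) hm.1).2 hcontra))
        · intro j _ hjm
          have hmin := Nat.find_min hex hjm
          by_contra hne2
          exact hmin ⟨by omega, hne2⟩
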